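-- pv_equiv track=rewrite | github.com/a0492658817-stack/assignment | 19.py | findsame
-- ===== SOURCE A (Python) =====
-- def findsame(courses):
--     n = len(courses)
--     result=[]
--     for i in range(n):
--         for j in range(i + 1, n):
--             name1, _, schedule1 = courses[i]
--             name2, _, schedule2 = courses[j]
--             same = set(schedule1) & set(schedule2)
--             if same:
--                 for s in same:
--                     result.append(f"{name1},{name2},{s}")
--
--     return(result)
-- ===== SOURCE B (Python) =====
-- def findsame(courses):
--     # Inverted index slot -> [(course index, name)], then emit one entry per
--     # overlapping pair per shared slot and order entries by course-index pair.
--     n = len(courses)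
--     slot_map = {}
--     for idx, (name, _, schedule) in enumerate(courses):
--         seen = set()
--         for s in schedule:
--             if s not in seen:
--                 seen.add(s)
--                 slot_map.setdefault(s, []).append((idx, name))
--     entries = []
--     for s, lst in slot_map.items():
--         for a in range(len(lst)):
--             i, name1 = lst[a]
--             for b in range(a + 1, len(lst)):
--                 j, name2 = lst[b]
--                 entries.append((i * n + j, f"{name1},{name2},{s}"))
--     entries.sort(key=lambda e: e[0])
--     return [line for _, line in entries]
-- ===== Notes on version B (the rewrite author's own statement) =====
-- stated objective: alternative
-- what changed: Replaces A's all-pairs loop (which builds two Python sets and intersects them for every pair of courses) by a single pass that builds an inverted index slot -> [(index, name)], emits one keyed entry per overlapping pair per shared slot, and sorts the entries by course-index pair to reproduce A's output order.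
import Mathlib
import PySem

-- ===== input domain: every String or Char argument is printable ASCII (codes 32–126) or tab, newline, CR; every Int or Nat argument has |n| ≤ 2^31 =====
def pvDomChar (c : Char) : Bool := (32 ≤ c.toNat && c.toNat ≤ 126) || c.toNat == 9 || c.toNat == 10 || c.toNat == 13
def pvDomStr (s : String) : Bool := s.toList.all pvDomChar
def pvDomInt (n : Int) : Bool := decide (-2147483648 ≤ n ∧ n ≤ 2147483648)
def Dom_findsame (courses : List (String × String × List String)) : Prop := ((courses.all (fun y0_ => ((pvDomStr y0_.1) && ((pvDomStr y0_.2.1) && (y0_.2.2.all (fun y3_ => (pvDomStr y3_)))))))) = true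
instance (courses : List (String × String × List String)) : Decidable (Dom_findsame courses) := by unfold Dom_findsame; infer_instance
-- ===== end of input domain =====

-- B replaces A's all-pairs set intersections by an inverted index slot → courses plus a
-- final sort by course-index pair (objective: alternative algorithm, same cost).

-- shared formatting helper: f"{n1},{n2},{s}"
def pvLine (n1 n2 s : String) : String := String.ofList (n1.toList ++ ',' :: (n2.toList ++ ',' :: s.toList))

-- ===== PORT A =====
def findsame (courses : List (String × String × List String)) : List String :=
  let n : Int := PySem.List.len courses
  (PySem.List.pyRange 0 n).foldl (fun result i =>
    (PySem.List.pyRange (i + 1) n).foldl (fun result j =>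
      let c1 := PySem.List.pyGetD courses i ("", "", [])
      let c2 := PySem.List.pyGetD courses j ("", "", [])
      let same : PySem.Set String := PySem.Set.inter (PySem.Set.ofList c1.2.2) (PySem.Set.ofList c2.2.2)
      -- 'for s in same' is only order-independent when |same| ≤ 1: Pre_ below guarantees it
      if same.isEmpty then result
      else same.foldl (fun result s => result ++ [pvLine c1.1 c2.1 s]) result) result) []

-- ===== PORT B =====
def findsame_alt (courses : List (String × String × List String)) : List String :=
  let n : Int := PySem.List.len courses
  let slotMap : PySem.Dict String (List (Int × String)) :=
    (PySem.List.enumerate courses).foldl (fun d p =>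
      (p.2.2.2.foldl
        (fun (st : PySem.Dict String (List (Int × String)) × PySem.Set String) s =>
          if st.2.contains s then st
          else (st.1.modify s [] (fun l => l ++ [(p.1, p.2.1)]), st.2.add s))
        (d, PySem.Set.empty)).1)
      PySem.Dict.empty
  let entries : List (Int × String) :=
    slotMap.items.foldl (fun es q =>
      (PySem.List.pyRange 0 (PySem.List.len q.2)).foldl (fun es a =>
        let x := PySem.List.pyGetD q.2 a (0, "")
        (PySem.List.pyRange (a + 1) (PySem.List.len q.2)).foldl (fun es b =>
          let y := PySem.List.pyGetD q.2 b (0, "")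
          es ++ [(x.1 * n + y.1, pvLine x.2 y.2 q.1)]) es) es) []
  (PySem.List.sorted entries (fun e => e.1)).map (fun e => e.2)

-- ===== PRECONDITION & SPEC =====
-- Pre_ excludes inputs on which some pair of courses shares TWO OR MORE schedule slots:
-- there A still returns, but the relative order of that pair's output lines is an accident
-- of Python's set iteration (hash) order — it varies from run to run — so neither order can
-- be specified or matched.
def Pre_findsame (courses : List (String × String × List String)) : Prop :=
  List.Pairwise (fun c1 c2 =>
    (PySem.Set.inter (PySem.Set.ofList c1.2.2) (PySem.Set.ofList c2.2.2)).length ≤ 1) courses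
instance (courses : List (String × String × List String)) : Decidable (Pre_findsame courses) := by
  unfold Pre_findsame; infer_instance

def pvWitness_findsame : (List (String × String × List String)) :=
  [("alg", "x", ["Mon", "Wed"]), ("db", "y", ["Wed", "Fri"]), ("ml", "z", ["Fri"])]

def Spec_findsame (courses : List (String × String × List String)) (out : List String) : Prop := out = findsame_alt courses
instance (courses : List (String × String × List String)) (out : List String) : Decidable (Spec_findsame courses out) := by unfold Spec_findsame; infer_instance

-- ===== CLAIM (what is proved, stated in full; the proofs are below) =====
def Claim_equal_findsame : Prop := ∀ (courses : List (String × String × List String)), Dom_findsame courses → Pre_findsame courses → Spec_findsame courses (findsame courses)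

-- ===== LEMMAS AND PROOFS =====

-- proof-side vocabulary
def pvDflt : String × String × List String := ("", "", [])
def pvInter (c1 c2 : String × String × List String) : List String :=
  PySem.Set.inter (PySem.Set.ofList c1.2.2) (PySem.Set.ofList c2.2.2)
def pvPairs (N : Int) : List (Int × Int) :=
  (PySem.List.pyRange 0 N).flatMap (fun i => (PySem.List.pyRange (i + 1) N).map (fun j => (i, j)))
def pvK (courses : List (String × String × List String)) : List (Int × String) :=
  (pvPairs (PySem.List.len courses)).flatMap (fun p =>
    (pvInter (PySem.List.pyGetD courses p.1 pvDflt) (PySem.List.pyGetD courses p.2 pvDflt)).map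
      (fun s => (p.1 * PySem.List.len courses + p.2,
        pvLine (PySem.List.pyGetD courses p.1 pvDflt).1 (PySem.List.pyGetD courses p.2 pvDflt).1 s)))
def pvF (courses : List (String × String × List String)) (s : String) : List (Int × String) :=
  ((PySem.List.enumerate courses).filter (fun p => p.2.2.2.contains s)).map (fun p => (p.1, p.2.1))
def pvBlock (n : Int) (s : String) (lst : List (Int × String)) : List (Int × String) :=
  (pvPairs (PySem.List.len lst)).flatMap (fun p =>
    [((PySem.List.pyGetD lst p.1 (0, "")).1 * n + (PySem.List.pyGetD lst p.2 (0, "")).1,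
      pvLine (PySem.List.pyGetD lst p.1 (0, "")).2 (PySem.List.pyGetD lst p.2 (0, "")).2 s)])
def pvSlotMap (courses : List (String × String × List String)) : PySem.Dict String (List (Int × String)) :=
  (PySem.List.enumerate courses).foldl (fun d p =>
    (p.2.2.2.foldl
      (fun (st : PySem.Dict String (List (Int × String)) × PySem.Set String) s =>
        if st.2.contains s then st
        else (st.1.modify s [] (fun l => l ++ [(p.1, p.2.1)]), st.2.add s))
      (d, PySem.Set.empty)).1)
    PySem.Dict.empty
def pvEntries (courses : List (String × String × List String)) : List (Int × String) :=
  (pvSlotMap courses).items.flatMap (fun q => pvBlock (PySem.List.len courses) q.1 q.2)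

lemma pv_mem_pairs (N : Int) (p : Int × Int) :
    p ∈ pvPairs N ↔ 0 ≤ p.1 ∧ p.1 < p.2 ∧ p.2 < N := by
  simp only [pvPairs, List.mem_flatMap, List.mem_map, PySem.List.mem_pyRange_one]
  constructor
  · rintro ⟨i, hi, j, hj, rfl⟩
    refine ⟨hi.1, ?_, hj.2⟩
    show i < j
    omega
  · rintro ⟨h1, h2, h3⟩
    exact ⟨p.1, ⟨h1, by omega⟩, p.2, ⟨by omega, h3⟩, rfl⟩

lemma pv_pyRange_pairwise (a b : Int) :
    (PySem.List.pyRange a b).Pairwise (fun x y => x < y) := by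
  rw [List.pairwise_iff_getElem]
  intro i j hi hj hij
  rw [PySem.List.getElem_pyRange_one a b i hi, PySem.List.getElem_pyRange_one a b j hj]
  omega

lemma pv_pairs_pairwise (N : Int) :
    (pvPairs N).Pairwise (fun p q => p.1 < q.1 ∨ (p.1 = q.1 ∧ p.2 < q.2)) := by
  unfold pvPairs
  rw [List.pairwise_flatMap]
  constructor
  · intro i _
    rw [List.pairwise_map]
    exact (pv_pyRange_pairwise _ _).imp (fun h => Or.inr ⟨rfl, h⟩)
  · refine (pv_pyRange_pairwise 0 N).imp ?_
    rintro i i' hlt x hx y hy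
    obtain ⟨j, -, rfl⟩ := List.mem_map.1 hx
    obtain ⟨j', -, rfl⟩ := List.mem_map.1 hy
    exact Or.inl hlt

lemma pv_fold_same (c1 c2 : String × String × List String) (res : List String) :
    (if (PySem.Set.inter (PySem.Set.ofList c1.2.2) (PySem.Set.ofList c2.2.2)).isEmpty then res
     else (PySem.Set.inter (PySem.Set.ofList c1.2.2) (PySem.Set.ofList c2.2.2)).foldl
            (fun r s => r ++ [pvLine c1.1 c2.1 s]) res)
    = res ++ (pvInter c1 c2).map (pvLine c1.1 c2.1) := by
  by_cases h : (PySem.Set.inter (PySem.Set.ofList c1.2.2) (PySem.Set.ofList c2.2.2)).isEmpty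
  · rw [if_pos h]
    rw [List.isEmpty_iff] at h
    simp [pvInter, h]
  · rw [if_neg h, PySem.List.foldl_append_singleton_eq_map]
    rfl

lemma pv_A_eq_K (courses : List (String × String × List String)) :
    findsame courses = (pvK courses).map (fun e => e.2) := by
  unfold findsame
  have hin : ∀ (res : List String) (i : Int),
      (PySem.List.pyRange (i + 1) (PySem.List.len courses)).foldl
        (fun result j =>
          let c1 := PySem.List.pyGetD courses i ("", "", [])
          let c2 := PySem.List.pyGetD courses j ("", "", [])
          let same : PySem.Set String := PySem.Set.inter (PySem.Set.ofList c1.2.2) (PySem.Set.ofList c2.2.2)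
          if same.isEmpty then result
          else same.foldl (fun result s => result ++ [pvLine c1.1 c2.1 s]) result) res
      = res ++ (PySem.List.pyRange (i + 1) (PySem.List.len courses)).flatMap (fun j =>
          (pvInter (PySem.List.pyGetD courses i pvDflt) (PySem.List.pyGetD courses j pvDflt)).map
            (pvLine (PySem.List.pyGetD courses i pvDflt).1 (PySem.List.pyGetD courses j pvDflt).1)) := by
    intro res i
    exact (PySem.List.foldl_congr_mem _ _
      (fun result j => result ++
        (pvInter (PySem.List.pyGetD courses i pvDflt) (PySem.List.pyGetD courses j pvDflt)).map
          (pvLine (PySem.List.pyGetD courses i pvDflt).1 (PySem.List.pyGetD courses j pvDflt).1)) _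
      (fun acc j _ => pv_fold_same _ _ acc)).trans
      (PySem.List.foldl_append_eq_flatMap _ _ _)
  refine ((PySem.List.foldl_congr_mem _ _
    (fun result i => result ++ (PySem.List.pyRange (i + 1) (PySem.List.len courses)).flatMap (fun j =>
      (pvInter (PySem.List.pyGetD courses i pvDflt) (PySem.List.pyGetD courses j pvDflt)).map
        (pvLine (PySem.List.pyGetD courses i pvDflt).1 (PySem.List.pyGetD courses j pvDflt).1))) _
    (fun acc i _ => hin acc i)).trans
    (PySem.List.foldl_append_eq_flatMap _ _ _)).trans ?_
  simp [pvK, pvPairs, List.map_flatMap, List.flatMap_map, List.map_map, List.flatMap_assoc, Function.comp_def, PySem.List.len_eq]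

set_option maxHeartbeats 1000000 in
lemma pv_B_eq_sorted (courses : List (String × String × List String)) :
    findsame_alt courses = (PySem.List.sorted (pvEntries courses) (fun e => e.1)).map (fun e => e.2) := by
  have hmid : ∀ (q : String × List (Int × String)) (es : List (Int × String)),
      (PySem.List.pyRange 0 (PySem.List.len q.2)).foldl (fun es a =>
        let x := PySem.List.pyGetD q.2 a (0, "")
        (PySem.List.pyRange (a + 1) (PySem.List.len q.2)).foldl (fun es b =>
          let y := PySem.List.pyGetD q.2 b (0, "")
          es ++ [(x.1 * PySem.List.len courses + y.1, pvLine x.2 y.2 q.1)]) es) es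
      = es ++ pvBlock (PySem.List.len courses) q.1 q.2 := by
    intro q es
    refine ((PySem.List.foldl_congr_mem _ _
      (fun es a => es ++ (PySem.List.pyRange (a + 1) (PySem.List.len q.2)).flatMap (fun b =>
        [((PySem.List.pyGetD q.2 a (0, "")).1 * PySem.List.len courses + (PySem.List.pyGetD q.2 b (0, "")).1,
          pvLine (PySem.List.pyGetD q.2 a (0, "")).2 (PySem.List.pyGetD q.2 b (0, "")).2 q.1)])) _
      (fun acc a _ => PySem.List.foldl_append_eq_flatMap _ _ _)).trans
      (PySem.List.foldl_append_eq_flatMap _ _ _)).trans ?_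
    refine congrArg (es ++ ·) ?_
    simp [pvBlock, pvPairs, List.flatMap_assoc, List.flatMap_map]
  have hout :
      (pvSlotMap courses).items.foldl (fun es q =>
        (PySem.List.pyRange 0 (PySem.List.len q.2)).foldl (fun es a =>
          let x := PySem.List.pyGetD q.2 a (0, "")
          (PySem.List.pyRange (a + 1) (PySem.List.len q.2)).foldl (fun es b =>
            let y := PySem.List.pyGetD q.2 b (0, "")
            es ++ [(x.1 * PySem.List.len courses + y.1, pvLine x.2 y.2 q.1)]) es) es) []
      = pvEntries courses := by
    unfold pvEntries
    generalize (pvSlotMap courses).items = L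
    refine ((PySem.List.foldl_congr_mem L
      (fun es q =>
        (PySem.List.pyRange 0 (PySem.List.len q.2)).foldl (fun es a =>
          let x := PySem.List.pyGetD q.2 a (0, "")
          (PySem.List.pyRange (a + 1) (PySem.List.len q.2)).foldl (fun es b =>
            let y := PySem.List.pyGetD q.2 b (0, "")
            es ++ [(x.1 * PySem.List.len courses + y.1, pvLine x.2 y.2 q.1)]) es) es)
      (fun es q => es ++ pvBlock (PySem.List.len courses) q.1 q.2) []
      (fun acc q _ => hmid q acc)).trans
      (PySem.List.foldl_append_eq_flatMap _ _ _)).trans ?_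
    simp
  exact congrArg (fun l => (PySem.List.sorted l (fun e => e.1)).map (fun e => e.2)) hout

lemma pv_pre_idx (courses : List (String × String × List String)) (h : Pre_findsame courses)
    (i j : Nat) (hi : i < courses.length) (hj : j < courses.length) (hij : i < j) :
    (pvInter courses[i] courses[j]).length ≤ 1 := by
  unfold Pre_findsame at h
  rw [List.pairwise_iff_getElem] at h
  exact h i j hi hj hij

lemma pv_pairwise_of_len_le_one {α : Type} {R : α → α → Prop} {l : List α}
    (h : l.length ≤ 1) : l.Pairwise R := by
  match l with
  | [] => exact List.Pairwise.nil
  | [x] => simp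
  | x :: y :: t => simp at h

lemma pv_K_pairwise (courses : List (String × String × List String)) (h : Pre_findsame courses) :
    (pvK courses).Pairwise (fun a b => a.1 < b.1) := by
  unfold pvK
  rw [List.pairwise_flatMap]
  constructor
  · intro p hp
    rw [List.pairwise_map]
    rw [pv_mem_pairs] at hp
    obtain ⟨h1, h2, h3⟩ := hp
    rw [PySem.List.len_eq] at h3
    have e1 : PySem.List.pyGetD courses p.1 pvDflt = courses[p.1.toNat] :=
      PySem.List.pyGetD_eq_getElem courses pvDflt h1 (by omega)
    have e2 : PySem.List.pyGetD courses p.2 pvDflt = courses[p.2.toNat] :=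
      PySem.List.pyGetD_eq_getElem courses pvDflt (by omega) (by omega)
    refine pv_pairwise_of_len_le_one ?_
    rw [e1, e2]
    exact pv_pre_idx courses h p.1.toNat p.2.toNat (by omega) (by omega) (by omega)
  · refine (List.Pairwise.and_mem.mp (pv_pairs_pairwise (PySem.List.len courses))).imp ?_
    rintro p q ⟨hp, hq, hlex⟩ x hx y hy
    rw [pv_mem_pairs] at hp hq
    obtain ⟨-, -, rfl⟩ := List.mem_map.1 hx
    obtain ⟨-, -, rfl⟩ := List.mem_map.1 hy
    show p.1 * PySem.List.len courses + p.2 < q.1 * PySem.List.len courses + q.2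
    rw [PySem.List.len_eq] at *
    rcases hlex with hlt | ⟨heq, hlt⟩
    · nlinarith [hp.1, hp.2.1, hp.2.2, hq.1, hq.2.1, hq.2.2]
    · rw [heq]; omega

def pvFl (l : List (Int × (String × String × List String))) (s : String) : List (Int × String) :=
  (l.filter (fun p => p.2.2.2.contains s)).map (fun p => (p.1, p.2.1))

lemma pv_inner_get? (i : Int) (nm : String)
    (sched : List String) (d : PySem.Dict String (List (Int × String)))
    (seen : PySem.Set String) (s : String) :
    ((sched.foldl (fun st t =>
        if st.2.contains t then st
        else (st.1.modify t [] (fun l => l ++ [(i, nm)]), st.2.add t)) (d, seen)).1).get? s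
    = if s ∈ sched ∧ s ∉ seen then some (((d.get? s).getD []) ++ [(i, nm)]) else d.get? s := by
  induction sched generalizing d seen with
  | nil => simp
  | cons t ts ih =>
    simp only [List.foldl_cons]
    by_cases hc : (seen.contains t : Bool) = true
    · rw [if_pos hc, ih]
      have ht : t ∈ seen := by simpa [PySem.Set.contains] using hc
      by_cases hst : s = t
      · subst hst; simp [ht]
      · simp [List.mem_cons, hst]
    · rw [if_neg hc, ih]
      have ht : t ∉ seen := by simpa [PySem.Set.contains] using hc
      by_cases hst : s = t
      · subst hst
        simp [PySem.Dict.modify, ht, PySem.Dict.getD]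
      · simp only [PySem.Set.mem_add, List.mem_cons, hst, or_false, false_or]
        have hget : ((d.modify t [] (fun l => l ++ [(i, nm)])).get? s) = d.get? s := by
          simp [PySem.Dict.modify, PySem.Dict.get?_insert, hst]
        rw [hget]

lemma pv_outer_get? (l : List (Int × (String × String × List String)))
    (d : PySem.Dict String (List (Int × String))) (s : String) :
    ((l.foldl (fun d p =>
        (p.2.2.2.foldl (fun st t =>
          if st.2.contains t then st
          else (st.1.modify t [] (fun l => l ++ [(p.1, p.2.1)]), st.2.add t))
          (d, PySem.Set.empty)).1) d).get? s)
    = if pvFl l s = [] then d.get? s else some (((d.get? s).getD []) ++ pvFl l s) := by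
  induction l generalizing d with
  | nil => simp [pvFl]
  | cons p t ih =>
    simp only [List.foldl_cons]
    rw [ih]
    have hd1 : ((p.2.2.2.foldl (fun st t =>
          if st.2.contains t then st
          else (st.1.modify t [] (fun l => l ++ [(p.1, p.2.1)]), st.2.add t))
          (d, PySem.Set.empty)).1).get? s
        = if s ∈ p.2.2.2 then some (((d.get? s).getD []) ++ [(p.1, p.2.1)]) else d.get? s := by
      rw [pv_inner_get?]
      simp [PySem.Set.empty]
    have hfl : pvFl (p :: t) s
        = (if s ∈ p.2.2.2 then [(p.1, p.2.1)] else []) ++ pvFl t s := by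
      by_cases hm : s ∈ p.2.2.2
      · simp [pvFl, hm]
      · simp [pvFl, hm]
    rw [hfl]
    by_cases hm : s ∈ p.2.2.2
    · rw [if_pos hm] at hd1
      rw [hd1, if_pos hm]
      by_cases ht : pvFl t s = []
      · rw [if_pos ht, ht]; simp
      · rw [if_neg ht]; simp
    · rw [if_neg hm] at hd1
      rw [hd1, if_neg hm]
      simp

lemma pv_slotMap_get? (courses : List (String × String × List String)) (s : String) :
    (pvSlotMap courses).get? s = if pvF courses s = [] then none else some (pvF courses s) := by
  have h := pv_outer_get? (PySem.List.enumerate courses) PySem.Dict.empty s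
  unfold pvSlotMap
  rw [h]
  have : pvF courses s = pvFl (PySem.List.enumerate courses) s := rfl
  rw [this]
  simp [PySem.Dict.get?_empty]

lemma pv_inner_nodup_keys (i : Int) (nm : String) (sched : List String)
    (st : PySem.Dict String (List (Int × String)) × PySem.Set String)
    (h : st.1.keys.Nodup) :
    ((sched.foldl (fun st t =>
        if st.2.contains t then st
        else (st.1.modify t [] (fun l => l ++ [(i, nm)]), st.2.add t)) st).1).keys.Nodup := by
  induction sched generalizing st with
  | nil => exact h
  | cons t ts ih =>
    simp only [List.foldl_cons]
    by_cases hc : (st.2.contains t : Bool) = true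
    · rw [if_pos hc]; exact ih st h
    · rw [if_neg hc]
      refine ih _ ?_
      show ((st.1.modify t [] (fun l => l ++ [(i, nm)]))).keys.Nodup
      rw [PySem.Dict.modify]
      exact PySem.Dict.nodup_keys_insert _ _ _ h

lemma pv_outer_nodup_keys (l : List (Int × (String × String × List String)))
    (d : PySem.Dict String (List (Int × String))) (h : d.keys.Nodup) :
    ((l.foldl (fun d p =>
        (p.2.2.2.foldl (fun st t =>
          if st.2.contains t then st
          else (st.1.modify t [] (fun l => l ++ [(p.1, p.2.1)]), st.2.add t))
          (d, PySem.Set.empty)).1) d)).keys.Nodup := by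
  induction l generalizing d with
  | nil => exact h
  | cons p t ih =>
    simp only [List.foldl_cons]
    exact ih _ (pv_inner_nodup_keys p.1 p.2.1 p.2.2.2 (d, PySem.Set.empty) h)

lemma pv_slotMap_nodup_keys (courses : List (String × String × List String)) :
    (pvSlotMap courses).keys.Nodup := by
  unfold pvSlotMap
  exact pv_outer_nodup_keys _ _ (by simp)

lemma pv_mem_F (courses : List (String × String × List String)) (s : String) (q : Int × String) :
    q ∈ pvF courses s ↔ ∃ (k : Nat) (h : k < courses.length),
      s ∈ courses[k].2.2 ∧ q = ((k : Int), courses[k].1) := by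
  unfold pvF
  simp only [List.mem_map, List.mem_filter, PySem.List.mem_enumerate_iff]
  constructor
  · rintro ⟨p, ⟨⟨k, hk, rfl⟩, hs⟩, rfl⟩
    refine ⟨k, hk, by simpa using hs, by simp⟩
  · rintro ⟨k, hk, hs, rfl⟩
    exact ⟨((k : Int), courses[k]), ⟨⟨k, hk, by simp⟩, by simpa using hs⟩, rfl⟩

lemma pv_F_pairwise (courses : List (String × String × List String)) (s : String) :
    (pvF courses s).Pairwise (fun a b => a.1 < b.1) := by
  unfold pvF
  rw [List.pairwise_map]
  exact (PySem.List.pairwise_lt_enumerate courses 0).filter _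

lemma pv_mem_inter (c1 c2 : String × String × List String) (s : String) :
    s ∈ pvInter c1 c2 ↔ s ∈ c1.2.2 ∧ s ∈ c2.2.2 := by
  simp [pvInter, PySem.Set.inter, List.mem_filter, PySem.Set.mem_ofList, PySem.Set.contains]

lemma pv_mem_block (n : Int) (s : String) (lst : List (Int × String)) (e : Int × String) :
    e ∈ pvBlock n s lst ↔ ∃ (a b : Nat) (hab : a < b) (hb : b < lst.length),
      e = ((lst[a]'(lt_trans hab hb)).1 * n + (lst[b]'hb).1,
           pvLine (lst[a]'(lt_trans hab hb)).2 (lst[b]'hb).2 s) := by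
  unfold pvBlock
  simp only [List.mem_flatMap, List.mem_singleton]
  constructor
  · rintro ⟨p, hp, rfl⟩
    rw [pv_mem_pairs, PySem.List.len_eq] at hp
    obtain ⟨h1, h2, h3⟩ := hp
    refine ⟨p.1.toNat, p.2.toNat, by omega, by omega, ?_⟩
    rw [PySem.List.pyGetD_eq_getElem lst (0, "") h1 (by omega),
        PySem.List.pyGetD_eq_getElem lst (0, "") (by omega) (by omega)]
  · rintro ⟨a, b, hab, hb, rfl⟩
    refine ⟨((a : Int), (b : Int)), ?_, ?_⟩
    · rw [pv_mem_pairs, PySem.List.len_eq]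
      refine ⟨by omega, ?_, by omega⟩
      show (a : Int) < (b : Int)
      omega
    · rw [PySem.List.pyGetD_eq_getElem lst (0, "") (by omega) (by simp; omega),
          PySem.List.pyGetD_eq_getElem lst (0, "") (by omega) (by simp; omega)]
      simp

lemma pv_items_val (courses : List (String × String × List String))
    (q : String × List (Int × String)) (hq : q ∈ (pvSlotMap courses).items) :
    q.2 = pvF courses q.1 ∧ pvF courses q.1 ≠ [] := by
  have hget : (pvSlotMap courses).get? q.1 = some q.2 :=
    (PySem.Dict.get?_eq_some_iff_mem_items _ _ _ (pv_slotMap_nodup_keys courses)).2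
      (by simpa using hq)
  rw [pv_slotMap_get?] at hget
  by_cases hFe : pvF courses q.1 = []
  · rw [if_pos hFe] at hget; cases hget
  · rw [if_neg hFe] at hget; exact ⟨(Option.some.inj hget).symm, hFe⟩

lemma pv_F_mem_items (courses : List (String × String × List String)) (s : String)
    (hne : pvF courses s ≠ []) : (s, pvF courses s) ∈ (pvSlotMap courses).items :=
  (PySem.Dict.get?_eq_some_iff_mem_items _ _ _ (pv_slotMap_nodup_keys courses)).1
    (by rw [pv_slotMap_get?, if_neg hne])

lemma pv_mem_entries_iff (courses : List (String × String × List String)) (e : Int × String) :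
    e ∈ pvEntries courses ↔ e ∈ pvK courses := by
  unfold pvEntries pvK
  constructor
  · intro he
    obtain ⟨q, hq, hbl⟩ := List.mem_flatMap.1 he
    obtain ⟨hval, -⟩ := pv_items_val courses q hq
    rw [hval, pv_mem_block] at hbl
    obtain ⟨a, b, hab, hb, rfl⟩ := hbl
    have hpa : a < (pvF courses q.1).length := lt_trans hab hb
    obtain ⟨ka, hka, hsa, ea⟩ := (pv_mem_F courses q.1 _).1 (List.getElem_mem hpa)
    obtain ⟨kb, hkb, hsb, eb⟩ := (pv_mem_F courses q.1 _).1 (List.getElem_mem hb)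
    have hord : ((pvF courses q.1)[a]'hpa).1 < ((pvF courses q.1)[b]'hb).1 :=
      (List.pairwise_iff_getElem.1 (pv_F_pairwise courses q.1)) a b hpa hb hab
    rw [ea, eb] at hord
    have hkk : ka < kb := by simpa using hord
    rw [List.mem_flatMap]
    refine ⟨((ka : Int), (kb : Int)), ?_, ?_⟩
    · rw [pv_mem_pairs]
      refine ⟨?_, ?_, ?_⟩
      · show (0 : Int) ≤ (ka : Int); omega
      · show (ka : Int) < (kb : Int); omega
      · show (kb : Int) < PySem.List.len courses
        rw [PySem.List.len_eq]; omega
    · rw [List.mem_map]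
      refine ⟨q.1, ?_, ?_⟩
      · rw [PySem.List.pyGetD_eq_getElem courses pvDflt
              (by show (0 : Int) ≤ (ka : Int); omega)
              (by show (ka : Int) < ((courses.length : Nat) : Int); omega),
            PySem.List.pyGetD_eq_getElem courses pvDflt
              (by show (0 : Int) ≤ (kb : Int); omega)
              (by show (kb : Int) < ((courses.length : Nat) : Int); omega)]
        rw [pv_mem_inter]
        simp only [Int.toNat_natCast]
        exact ⟨hsa, hsb⟩
      · rw [ea, eb,
            PySem.List.pyGetD_eq_getElem courses pvDflt
              (by show (0 : Int) ≤ (ka : Int); omega)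
              (by show (ka : Int) < ((courses.length : Nat) : Int); omega),
            PySem.List.pyGetD_eq_getElem courses pvDflt
              (by show (0 : Int) ≤ (kb : Int); omega)
              (by show (kb : Int) < ((courses.length : Nat) : Int); omega)]
        simp
  · intro hk
    obtain ⟨p, hp, hmm⟩ := List.mem_flatMap.1 hk
    obtain ⟨s, hsmem, rfl⟩ := List.mem_map.1 hmm
    rw [pv_mem_pairs, PySem.List.len_eq] at hp
    obtain ⟨h1, h2, h3⟩ := hp
    rw [PySem.List.pyGetD_eq_getElem courses pvDflt h1 (by omega),
        PySem.List.pyGetD_eq_getElem courses pvDflt (by omega) (by omega)]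
      at hsmem ⊢
    rw [pv_mem_inter] at hsmem
    obtain ⟨hs1, hs2⟩ := hsmem
    have hA : ((p.1.toNat : Int), courses[p.1.toNat].1) ∈ pvF courses s :=
      (pv_mem_F courses s _).2 ⟨p.1.toNat, by omega, hs1, rfl⟩
    have hB : ((p.2.toNat : Int), courses[p.2.toNat].1) ∈ pvF courses s :=
      (pv_mem_F courses s _).2 ⟨p.2.toNat, by omega, hs2, rfl⟩
    have hne : pvF courses s ≠ [] := List.ne_nil_of_mem hA
    obtain ⟨a, ha, haeq⟩ := List.getElem_of_mem hA
    obtain ⟨b, hbl, hbeq⟩ := List.getElem_of_mem hB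
    have hpw := List.pairwise_iff_getElem.1 (pv_F_pairwise courses s)
    have hab : a < b := by
      rcases lt_trichotomy a b with h | h | h
      · exact h
      · exfalso
        subst h
        have hfst := congrArg Prod.fst (haeq.symm.trans hbeq)
        simp at hfst
        omega
      · exfalso
        have := hpw b a hbl ha h
        rw [haeq, hbeq] at this
        simp at this
        omega
    rw [List.mem_flatMap]
    refine ⟨(s, pvF courses s), pv_F_mem_items courses s hne, ?_⟩
    rw [pv_mem_block]
    refine ⟨a, b, hab, hbl, ?_⟩
    rw [haeq, hbeq]
    have e1 : (p.1.toNat : Int) = p.1 := Int.toNat_of_nonneg h1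
    have e2 : (p.2.toNat : Int) = p.2 := Int.toNat_of_nonneg (by omega)
    rw [e1, e2]

lemma pv_key_inj (n i i' j j' : Int) (heq : i * n + j = i' * n + j')
    (hj : 0 ≤ j) (hj2 : j < n) (hj' : 0 ≤ j') (hj2' : j' < n)
    (_hi : 0 ≤ i) (_hi' : 0 ≤ i') : i = i' ∧ j = j' := by
  rcases lt_trichotomy i i' with hl | hl | hl
  · exfalso; nlinarith
  · subst hl; omega
  · exfalso; nlinarith

lemma pv_two_le_length {l : List String} {a b : String}
    (ha : a ∈ l) (hb : b ∈ l) (hab : a ≠ b) : 2 ≤ l.length := by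
  calc 2 = ({a, b} : Finset String).card := (Finset.card_pair hab).symm
    _ ≤ l.toFinset.card := Finset.card_le_card (by
          intro x hx
          simp only [Finset.mem_insert, Finset.mem_singleton] at hx
          rcases hx with rfl | rfl <;> simp [List.mem_toFinset, ha, hb])
    _ ≤ l.length := List.toFinset_card_le l

lemma pv_block_elem_decode (courses : List (String × String × List String))
    (s : String) (x : Int × String)
    (hx : x ∈ pvBlock (PySem.List.len courses) s (pvF courses s)) :
    ∃ (ka kb : Nat) (h1 : ka < courses.length) (h2 : kb < courses.length),
      ka < kb ∧ s ∈ courses[ka].2.2 ∧ s ∈ courses[kb].2.2 ∧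
      x.1 = (ka : Int) * PySem.List.len courses + (kb : Int) := by
  rw [pv_mem_block] at hx
  obtain ⟨a, b, hab, hb, rfl⟩ := hx
  have hpa : a < (pvF courses s).length := lt_trans hab hb
  obtain ⟨ka, hka, hsa, ea⟩ := (pv_mem_F courses s _).1 (List.getElem_mem hpa)
  obtain ⟨kb, hkb, hsb, eb⟩ := (pv_mem_F courses s _).1 (List.getElem_mem hb)
  have hord : ((pvF courses s)[a]'hpa).1 < ((pvF courses s)[b]'hb).1 :=
    (List.pairwise_iff_getElem.1 (pv_F_pairwise courses s)) a b hpa hb hab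
  rw [ea, eb] at hord
  have hkk : ka < kb := by simpa using hord
  exact ⟨ka, kb, hka, hkb, hkk, hsa, hsb, by rw [ea, eb]⟩

lemma pv_entries_nodup (courses : List (String × String × List String)) (h : Pre_findsame courses) :
    (pvEntries courses).Nodup := by
  have hpw : (pvEntries courses).Pairwise (fun x y => x ≠ y) := by
    unfold pvEntries
    rw [List.pairwise_flatMap]
    constructor
    · -- within one slot block: keys strictly increase
      intro q hq
      obtain ⟨hval, -⟩ := pv_items_val courses q hq
      rw [hval]
      have hblt : (pvBlock (PySem.List.len courses) q.1 (pvF courses q.1)).Pairwise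
          (fun x y => x.1 < y.1) := by
        unfold pvBlock
        rw [List.pairwise_flatMap]
        refine ⟨fun p _ => by simp, ?_⟩
        refine (List.Pairwise.and_mem.mp (pv_pairs_pairwise _)).imp ?_
        rintro p p' ⟨hp, hp', hlex⟩ x hx y hy
        simp only [List.mem_singleton] at hx hy
        subst hx; subst hy
        rw [pv_mem_pairs, PySem.List.len_eq] at hp hp'
        obtain ⟨ha1, ha2, ha3⟩ := hp
        obtain ⟨hb1, hb2, hb3⟩ := hp'
        rw [PySem.List.pyGetD_eq_getElem _ (0, "") ha1 (by omega),
            PySem.List.pyGetD_eq_getElem _ (0, "") (by omega) (by omega),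
            PySem.List.pyGetD_eq_getElem _ (0, "") hb1 (by omega),
            PySem.List.pyGetD_eq_getElem _ (0, "") (by omega) (by omega)]
        show ((pvF courses q.1)[p.1.toNat]'(by omega)).1 * PySem.List.len courses
              + ((pvF courses q.1)[p.2.toNat]'(by omega)).1
            < ((pvF courses q.1)[p'.1.toNat]'(by omega)).1 * PySem.List.len courses
              + ((pvF courses q.1)[p'.2.toNat]'(by omega)).1
        have hbound : ∀ (k : Nat) (hk : k < (pvF courses q.1).length),
            0 ≤ ((pvF courses q.1)[k]'hk).1 ∧
            ((pvF courses q.1)[k]'hk).1 < PySem.List.len courses := by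
          intro k hk
          obtain ⟨m, hm, -, em⟩ := (pv_mem_F courses q.1 _).1 (List.getElem_mem hk)
          rw [em, PySem.List.len_eq]
          constructor <;> omega
        have hordF := List.pairwise_iff_getElem.1 (pv_F_pairwise courses q.1)
        obtain ⟨hA0, hA1⟩ := hbound p.1.toNat (by omega)
        obtain ⟨hB0, hB1⟩ := hbound p.2.toNat (by omega)
        obtain ⟨hC0, hC1⟩ := hbound p'.1.toNat (by omega)
        obtain ⟨hD0, hD1⟩ := hbound p'.2.toNat (by omega)
        rcases hlex with hlt | ⟨heqf, hlt⟩
        · have hac := hordF p.1.toNat p'.1.toNat (by omega) (by omega) (by omega)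
          nlinarith
        · have hf : p.1.toNat = p'.1.toNat := by omega
          have hbd := hordF p.2.toNat p'.2.toNat (by omega) (by omega) (by omega)
          have hfe : ((pvF courses q.1)[p.1.toNat]'(by omega)).1
              = ((pvF courses q.1)[p'.1.toNat]'(by omega)).1 := by simp only [hf]
          have hmul : ((pvF courses q.1)[p.1.toNat]'(by omega)).1 * PySem.List.len courses
              = ((pvF courses q.1)[p'.1.toNat]'(by omega)).1 * PySem.List.len courses := by
            rw [hfe]
          omega
      exact hblt.imp (fun hlt he => by rw [he] at hlt; exact lt_irrefl _ hlt)
    · -- across slot blocks: a shared key pair would share two slots, impossible under Pre_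
      have hkeys := pv_slotMap_nodup_keys courses
      simp only [PySem.Dict.keys] at hkeys
      have hne_pw : (pvSlotMap courses).items.Pairwise (fun q1 q2 => q1.1 ≠ q2.1) :=
        List.pairwise_map.mp hkeys
      refine (List.Pairwise.and_mem.mp hne_pw).imp ?_
      rintro q1 q2 ⟨hq1, hq2, hne⟩ x hx y hy heq
      subst heq
      obtain ⟨hval1, -⟩ := pv_items_val courses q1 hq1
      obtain ⟨hval2, -⟩ := pv_items_val courses q2 hq2
      rw [hval1] at hx
      rw [hval2] at hy
      obtain ⟨ka1, kb1, h11, h12, hlt1, hs11, hs12, hk1⟩ := pv_block_elem_decode courses q1.1 x hx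
      obtain ⟨ka2, kb2, h21, h22, hlt2, hs21, hs22, hk2⟩ := pv_block_elem_decode courses q2.1 x hy
      have hkey := hk1.symm.trans hk2
      have hinj := pv_key_inj (PySem.List.len courses) (ka1 : Int) (ka2 : Int) (kb1 : Int) (kb2 : Int)
        hkey (by omega) (by rw [PySem.List.len_eq]; omega) (by omega)
        (by rw [PySem.List.len_eq]; omega) (by omega) (by omega)
      have hka : ka1 = ka2 := by omega
      have hkb : kb1 = kb2 := by omega
      subst hka; subst hkb
      have hm1 : q1.1 ∈ pvInter courses[ka1] courses[kb1] := (pv_mem_inter _ _ _).2 ⟨hs11, hs12⟩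
      have hm2 : q2.1 ∈ pvInter courses[ka1] courses[kb1] := (pv_mem_inter _ _ _).2 ⟨hs21, hs22⟩
      have h2le := pv_two_le_length hm1 hm2 hne
      have h1le := pv_pre_idx courses h ka1 kb1 h11 h12 hlt1
      omega
  exact hpw


-- ===== VERDICT (by name: the statement is the Claim_ definition above) =====
theorem findsame_spec : Claim_equal_findsame := by
  intro courses _ hpre
  unfold Spec_findsame
  have hK := pv_K_pairwise courses hpre
  have hKnd : (pvK courses).Nodup :=
    (hK.imp (fun {a b} hlt he => by rw [he] at hlt; exact lt_irrefl _ hlt))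
  have hperm : (pvK courses).Perm (pvEntries courses) :=
    (List.perm_ext_iff_of_nodup hKnd (pv_entries_nodup courses hpre)).2
      (fun a => (pv_mem_entries_iff courses a).symm)
  rw [pv_A_eq_K, pv_B_eq_sorted,
    PySem.List.sorted_eq_of_perm_of_pairwise_lt _ _ _ hperm hK]
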